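-- pv_equiv track=rewrite | github.com/shreyasdivan/routing | CVRP_0600_P.py | create_demand_arr_dict
-- ===== SOURCE A (Python) =====
-- def create_demand_arr_dict(mul, demand): # Create a virtual demand array considering max capacity of vehicle
--
--     demand_arr = []
--     demand_dict = {}
--     for idx, i in enumerate(demand):
--         if i > mul:
--             nmul = i // mul
--             rem = i % mul
--             for j in range(nmul):
--                 index = len(demand_arr)
--                 demand_dict[index] = idx
--                 demand_arr.append(mul)
--             if rem > 0:
--                 index = len(demand_arr)
--                 demand_dict[index] = idx
--                 demand_arr.append(rem)
--         else:
--             index = len(demand_arr)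
--             demand_dict[index] = idx
--             demand_arr.append(i)
--     return demand_arr, demand_dict
-- ===== SOURCE B (Python) =====
-- def create_demand_arr_dict(mul, demand): # Create a virtual demand array considering max capacity of vehicle
--     # Pass 1: build the chunk list per original index; record each chunk's length.
--     demand_arr = []
--     counts = []
--     for i in demand:
--         if i > mul:
--             q, r = divmod(i, mul)
--             chunk = [mul] * q + ([r] if r > 0 else [])
--         else:
--             chunk = [i]
--         demand_arr.extend(chunk)
--         counts.append(len(chunk))
--     # Pass 2: rebuild the position -> original-index map from the counts alone.
--     demand_dict = {}
--     pos = 0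
--     for idx, c in enumerate(counts):
--         for _ in range(c):
--             demand_dict[pos] = idx
--             pos += 1
--     return demand_arr, demand_dict
-- ===== Notes on version B (the rewrite author's own statement) =====
-- stated objective: alternative
-- what changed: A builds the array and the position-to-index dict interleaved in one pass; B first builds the array plus a per-element chunk-count list, then reconstructs the dict in a second pass from the counts with a running position counter.
import Mathlib
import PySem

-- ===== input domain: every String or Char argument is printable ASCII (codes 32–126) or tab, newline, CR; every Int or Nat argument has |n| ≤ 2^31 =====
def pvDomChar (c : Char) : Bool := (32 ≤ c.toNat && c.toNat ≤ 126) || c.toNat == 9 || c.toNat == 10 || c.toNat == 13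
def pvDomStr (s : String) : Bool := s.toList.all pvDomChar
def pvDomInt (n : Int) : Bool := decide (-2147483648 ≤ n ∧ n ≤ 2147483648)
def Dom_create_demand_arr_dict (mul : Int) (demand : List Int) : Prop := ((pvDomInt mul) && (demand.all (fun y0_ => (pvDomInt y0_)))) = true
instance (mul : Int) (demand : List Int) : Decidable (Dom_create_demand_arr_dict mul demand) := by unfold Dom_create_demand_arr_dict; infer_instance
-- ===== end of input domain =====

-- B rebuilds the position→index dict in a separate second pass from a chunk-count list
-- instead of interleaving dict and array construction in one pass (objective: alternative).


-- ===== PORT A =====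
-- body of A's loop over enumerate(demand), for one (idx, i)
def pvLoopA (mul : Int) (st : List Int × PySem.Dict Int Int) (idx i : Int) :
    List Int × PySem.Dict Int Int :=
  if i > mul then
    let nmul := PySem.Int.floordiv i mul
    let rem := PySem.Int.mod i mul
    let st2 := (PySem.List.pyRange 0 nmul 1).foldl
      (fun (st : List Int × PySem.Dict Int Int) _ =>
        (st.1 ++ [mul], st.2.insert (st.1.length : Int) idx)) st
    if rem > 0 then (st2.1 ++ [rem], st2.2.insert (st2.1.length : Int) idx) else st2
  else (st.1 ++ [i], st.2.insert (st.1.length : Int) idx)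

def create_demand_arr_dict (mul : Int) (demand : List Int) : List Int × (List (Int × Int)) :=
  let st := (PySem.List.enumerate demand).foldl
    (fun st p => pvLoopA mul st p.1 p.2) ([], PySem.Dict.empty)
  (st.1, st.2.items)

-- ===== PORT B =====
-- pass 1 body: chunks for one demand entry, appended to the array, its count recorded
def pvChunkB (mul i : Int) : List Int :=
  if i > mul then
    let q := PySem.Int.floordiv i mul
    let r := PySem.Int.mod i mul
    List.replicate q.toNat mul ++ (if r > 0 then [r] else [])
  else [i]

-- pass 2 body: emit c consecutive pos ↦ idx entries
def pvLoopB (st : PySem.Dict Int Int × Int) (idx c : Int) : PySem.Dict Int Int × Int :=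
  (PySem.List.pyRange 0 c 1).foldl
    (fun (st : PySem.Dict Int Int × Int) _ => (st.1.insert st.2 idx, st.2 + 1)) st

def create_demand_arr_dict_alt (mul : Int) (demand : List Int) : List Int × (List (Int × Int)) :=
  let p1 := demand.foldl
    (fun (st : List Int × List Int) i =>
      (st.1 ++ pvChunkB mul i, st.2 ++ [((pvChunkB mul i).length : Int)])) ([], [])
  let p2 := (PySem.List.enumerate p1.2).foldl
    (fun st p => pvLoopB st p.1 p.2) (PySem.Dict.empty, 0)
  (p1.1, p2.1.items)

-- ===== PRECONDITION & SPEC =====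
-- Pre_ excludes exactly the inputs where Python A raises ZeroDivisionError:
-- mul = 0 together with some demand entry > 0 reaches 'i // mul' (B raises there too).
def Pre_create_demand_arr_dict (mul : Int) (demand : List Int) : Prop :=
  mul = 0 → ∀ i ∈ demand, i ≤ 0
instance (mul : Int) (demand : List Int) : Decidable (Pre_create_demand_arr_dict mul demand) := by unfold Pre_create_demand_arr_dict; infer_instance
def pvWitness_create_demand_arr_dict : Int × List Int := (3, [7, 2, -1, 6])

def Spec_create_demand_arr_dict (mul : Int) (demand : List Int) (out : List Int × (List (Int × Int))) : Prop := out = create_demand_arr_dict_alt mul demand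
instance (mul : Int) (demand : List Int) (out : List Int × (List (Int × Int))) : Decidable (Spec_create_demand_arr_dict mul demand out) := by unfold Spec_create_demand_arr_dict; infer_instance

-- ===== CLAIM (what is proved, stated in full; the proofs are below) =====
def Claim_equal_create_demand_arr_dict : Prop := ∀ (mul : Int) (demand : List Int), Dom_create_demand_arr_dict mul demand → Pre_create_demand_arr_dict mul demand → Spec_create_demand_arr_dict mul demand (create_demand_arr_dict mul demand)

-- ===== LEMMAS AND PROOFS =====

-- n consecutive (position, idx) entries starting at pos
def pvEntsFor (pos idx : Int) (n : Nat) : List (Int × Int) :=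
  (List.range n).map (fun j : Nat => (pos + (j : Int), idx))

-- all entries generated from a list of chunk counts
def pvEnts : Int → Int → List Int → List (Int × Int)
  | _, _, [] => []
  | pos, idx, c :: cs => pvEntsFor pos idx c.toNat ++ pvEnts (pos + c) (idx + 1) cs

theorem pvEntsFor_succ_right (pos idx : Int) (n : Nat) :
    pvEntsFor pos idx (n + 1) = pvEntsFor pos idx n ++ [(pos + (n : Int), idx)] := by
  simp [pvEntsFor, List.range_succ]

theorem pvEntsFor_succ_left (pos idx : Int) (n : Nat) :
    pvEntsFor pos idx (n + 1) = (pos, idx) :: pvEntsFor (pos + 1) idx n := by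
  simp only [pvEntsFor, List.range_succ_eq_map, List.map_cons, List.map_map]
  refine List.cons_eq_cons.mpr ⟨by simp, ?_⟩
  apply List.map_congr_left
  intro j hj
  simp only [Function.comp, Prod.ext_iff]
  refine ⟨?_, trivial⟩
  push_cast
  ring

-- all keys of d are < n (so inserting key n appends)
def pvInv (d : PySem.Dict Int Int) (n : Int) : Prop := ∀ k, d.contains k = true → k < n

theorem pvInv_empty (n : Int) : pvInv PySem.Dict.empty n := by
  intro k hk; simp [PySem.Dict.contains_empty] at hk

theorem pvInv_fresh {d : PySem.Dict Int Int} {n : Int} (h : pvInv d n) (v : Int) :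
    (d.insert n v).items = d.items ++ [(n, v)] ∧ pvInv (d.insert n v) (n + 1) := by
  have hc : d.contains n = false := by
    by_contra hc
    have := h n (by revert hc; cases d.contains n <;> simp)
    omega
  constructor
  · simp [PySem.Dict.items_insert, hc]
  · intro k hk
    rw [PySem.Dict.contains_insert] at hk
    rcases Bool.or_eq_true_iff.mp hk with h1 | h1
    · have : k = n := by exact_mod_cast (beq_iff_eq).mp h1
      omega
    · have := h k h1; omega

theorem pvInv_mono {d : PySem.Dict Int Int} {n m : Int} (h : pvInv d n) (hnm : n ≤ m) :
    pvInv d m := fun k hk => lt_of_lt_of_le (h k hk) hnm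

-- A's inner range loop: only the list length matters
theorem A_inner {α : Type} (l : List α) (mul idx : Int) (arr : List Int) (d : PySem.Dict Int Int)
    (h : pvInv d (arr.length : Int)) :
    (l.foldl (fun (st : List Int × PySem.Dict Int Int) _ =>
        (st.1 ++ [mul], st.2.insert (st.1.length : Int) idx)) (arr, d)).1 =
      arr ++ List.replicate l.length mul ∧
    (l.foldl (fun (st : List Int × PySem.Dict Int Int) _ =>
        (st.1 ++ [mul], st.2.insert (st.1.length : Int) idx)) (arr, d)).2.items =
      d.items ++ pvEntsFor (arr.length : Int) idx l.length ∧
    pvInv (l.foldl (fun (st : List Int × PySem.Dict Int Int) _ =>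
        (st.1 ++ [mul], st.2.insert (st.1.length : Int) idx)) (arr, d)).2
      ((arr.length : Int) + (l.length : Int)) := by
  induction l generalizing arr d with
  | nil => simpa [pvEntsFor] using h
  | cons x xs ih =>
    obtain ⟨hit, hinv⟩ := pvInv_fresh h idx
    have h' : pvInv (d.insert (arr.length : Int) idx) ((arr ++ [mul]).length : Int) := by
      apply pvInv_mono hinv; simp
    obtain ⟨ih1, ih2, ih3⟩ := ih (arr ++ [mul]) (d.insert (arr.length : Int) idx) h'
    simp only [List.foldl_cons]
    refine ⟨?_, ?_, ?_⟩
    · rw [ih1]; simp [List.replicate_succ]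
    · rw [ih2, hit, List.length_cons, pvEntsFor_succ_left]
      have hl : (((arr ++ [mul]).length : Nat) : Int) = (arr.length : Int) + 1 := by
        simp only [List.length_append, List.length_cons, List.length_nil]; push_cast; ring
      rw [hl]
      simp
    · have hb : (↑arr.length : Int) + ↑(x :: xs).length = ↑(arr ++ [mul]).length + ↑xs.length := by
        simp only [List.length_cons, List.length_append, List.length_nil]
        push_cast; ring
      rw [hb]; exact ih3

-- B's inner counter loop
theorem B_inner {α : Type} (l : List α) (idx : Int) (d : PySem.Dict Int Int) (pos : Int)
    (h : pvInv d pos) :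
    (l.foldl (fun (st : PySem.Dict Int Int × Int) _ =>
        (st.1.insert st.2 idx, st.2 + 1)) (d, pos)).1.items =
      d.items ++ pvEntsFor pos idx l.length ∧
    (l.foldl (fun (st : PySem.Dict Int Int × Int) _ =>
        (st.1.insert st.2 idx, st.2 + 1)) (d, pos)).2 = pos + (l.length : Int) ∧
    pvInv (l.foldl (fun (st : PySem.Dict Int Int × Int) _ =>
        (st.1.insert st.2 idx, st.2 + 1)) (d, pos)).1 (pos + (l.length : Int)) := by
  induction l generalizing d pos with
  | nil => simpa [pvEntsFor] using h
  | cons x xs ih =>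
    obtain ⟨hit, hinv⟩ := pvInv_fresh h idx
    obtain ⟨ih1, ih2, ih3⟩ := ih (d.insert pos idx) (pos + 1) hinv
    simp only [List.foldl_cons]
    refine ⟨?_, ?_, ?_⟩
    · rw [ih1, hit, List.length_cons, pvEntsFor_succ_left]
      simp
    · rw [ih2]; push_cast [List.length_cons]; ring
    · have hb : pos + ((x :: xs).length : Int) = (pos + 1) + (xs.length : Int) := by
        push_cast [List.length_cons]; ring
      rw [hb]; exact ih3

-- A's per-element step produces the chunk and its entries
theorem A_step (mul i idx : Int) (arr : List Int) (d : PySem.Dict Int Int)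
    (h : pvInv d (arr.length : Int)) :
    (pvLoopA mul (arr, d) idx i).1 = arr ++ pvChunkB mul i ∧
    (pvLoopA mul (arr, d) idx i).2.items =
      d.items ++ pvEntsFor (arr.length : Int) idx (pvChunkB mul i).length ∧
    pvInv (pvLoopA mul (arr, d) idx i).2 (((arr ++ pvChunkB mul i).length : Int)) := by
  by_cases hgt : i > mul
  · simp only [pvLoopA, pvChunkB, if_pos hgt]
    obtain ⟨e1, e2, e3⟩ :=
      A_inner (PySem.List.pyRange 0 (PySem.Int.floordiv i mul) 1) mul idx arr d h
    have hlen : (PySem.List.pyRange 0 (PySem.Int.floordiv i mul) 1).length =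
        (PySem.Int.floordiv i mul).toNat := by
      rw [PySem.List.length_pyRange_one]; simp
    rw [hlen] at e1 e2 e3
    by_cases hrem : PySem.Int.mod i mul > 0
    · simp only [if_pos hrem]
      have hlen2 : ((((PySem.List.pyRange 0 (PySem.Int.floordiv i mul) 1).foldl
          (fun (st : List Int × PySem.Dict Int Int) _ =>
            (st.1 ++ [mul], st.2.insert (st.1.length : Int) idx)) (arr, d)).1.length : Int)) =
          (arr.length : Int) + ((PySem.Int.floordiv i mul).toNat : Int) := by
        rw [e1]; simp
      have e3' : pvInv ((PySem.List.pyRange 0 (PySem.Int.floordiv i mul) 1).foldl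
          (fun (st : List Int × PySem.Dict Int Int) _ =>
            (st.1 ++ [mul], st.2.insert (st.1.length : Int) idx)) (arr, d)).2
          ((((PySem.List.pyRange 0 (PySem.Int.floordiv i mul) 1).foldl
          (fun (st : List Int × PySem.Dict Int Int) _ =>
            (st.1 ++ [mul], st.2.insert (st.1.length : Int) idx)) (arr, d)).1.length : Int)) := by
        rw [hlen2]; exact e3
      obtain ⟨hit, hinv⟩ := pvInv_fresh e3' idx
      refine ⟨?_, ?_, ?_⟩
      · rw [e1]; simp
      · rw [hit, e2, hlen2]
        simp only [List.length_append, List.length_replicate, List.length_cons,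
          List.length_nil, Nat.zero_add]
        rw [pvEntsFor_succ_right]
        simp
      · convert hinv using 1
        rw [hlen2]
        simp
        ring
    · simp only [if_neg hrem]
      refine ⟨?_, ?_, ?_⟩
      · rw [e1]; simp
      · rw [e2]; simp
      · convert e3 using 1
        simp
  · simp only [pvLoopA, pvChunkB, if_neg hgt]
    obtain ⟨hit, hinv⟩ := pvInv_fresh h idx
    refine ⟨by simp, ?_, ?_⟩
    · rw [hit]
      have h1 : pvEntsFor (arr.length : Int) idx 1 = [((arr.length : Int), idx)] := by
        simp [pvEntsFor, List.range_succ]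
      simp [h1]
    · convert hinv using 1
      simp

-- A's outer loop over enumerate
theorem A_outer (mul : Int) (demand : List Int) (idx : Int) (arr : List Int)
    (d : PySem.Dict Int Int) (h : pvInv d (arr.length : Int)) :
    ((PySem.List.enumerate demand idx).foldl
      (fun st p => pvLoopA mul st p.1 p.2) (arr, d)).1 =
      arr ++ (demand.map (pvChunkB mul)).flatten ∧
    ((PySem.List.enumerate demand idx).foldl
      (fun st p => pvLoopA mul st p.1 p.2) (arr, d)).2.items =
      d.items ++ pvEnts (arr.length : Int) idx
        (demand.map (fun i => ((pvChunkB mul i).length : Int))) := by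
  induction demand generalizing idx arr d with
  | nil => simp [PySem.List.enumerate_nil, pvEnts]
  | cons i rest ih =>
    rw [PySem.List.enumerate_cons]
    simp only [List.foldl_cons]
    obtain ⟨h1, h2, h3⟩ := A_step mul i idx arr d h
    have hstate : pvLoopA mul (arr, d) idx i =
        (arr ++ pvChunkB mul i, (pvLoopA mul (arr, d) idx i).2) := by
      rw [← h1]
    rw [hstate]
    have h3' : pvInv (pvLoopA mul (arr, d) idx i).2
        (((arr ++ pvChunkB mul i).length : Int)) := h3
    obtain ⟨ihr1, ihr2⟩ := ih (idx + 1) (arr ++ pvChunkB mul i) _ h3'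
    refine ⟨?_, ?_⟩
    · rw [ihr1]; simp
    · rw [ihr2, h2]
      simp only [List.map_cons, pvEnts]
      have hc : ((((pvChunkB mul i).length : Int)).toNat) = (pvChunkB mul i).length :=
        Int.toNat_natCast _
      rw [hc]
      have hp : ((arr ++ pvChunkB mul i).length : Int) =
          (arr.length : Int) + ((pvChunkB mul i).length : Int) := by
        simp
      rw [hp]
      simp

-- B's first pass: array of chunks plus counts
theorem B_pass1 (mul : Int) (demand : List Int) (arr cnts : List Int) :
    (demand.foldl
      (fun (st : List Int × List Int) i =>
        (st.1 ++ pvChunkB mul i, st.2 ++ [((pvChunkB mul i).length : Int)])) (arr, cnts)) =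
      (arr ++ (demand.map (pvChunkB mul)).flatten,
        cnts ++ demand.map (fun i => ((pvChunkB mul i).length : Int))) := by
  induction demand generalizing arr cnts with
  | nil => simp
  | cons i rest ih =>
    simp only [List.foldl_cons]
    rw [ih]
    simp

-- B's second pass over enumerate of the counts
theorem B_pass2 (counts : List Int) (idx : Int) (d : PySem.Dict Int Int) (pos : Int)
    (h : pvInv d pos) (hc : ∀ c ∈ counts, 0 ≤ c) :
    ((PySem.List.enumerate counts idx).foldl
      (fun st p => pvLoopB st p.1 p.2) (d, pos)).1.items =
      d.items ++ pvEnts pos idx counts ∧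
    ((PySem.List.enumerate counts idx).foldl
      (fun st p => pvLoopB st p.1 p.2) (d, pos)).2 = pos + counts.sum ∧
    pvInv ((PySem.List.enumerate counts idx).foldl
      (fun st p => pvLoopB st p.1 p.2) (d, pos)).1 (pos + counts.sum) := by
  induction counts generalizing idx d pos with
  | nil => simpa [PySem.List.enumerate_nil, pvEnts] using h
  | cons c cs ih =>
    rw [PySem.List.enumerate_cons]
    simp only [List.foldl_cons]
    obtain ⟨e1, e2, e3⟩ := B_inner (PySem.List.pyRange 0 c 1) idx d pos h
    have hc0 : 0 ≤ c := hc c (by simp)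
    have hlenI : (((PySem.List.pyRange 0 c 1).length : Nat) : Int) = c := by
      rw [PySem.List.length_pyRange_one]
      simp [Int.toNat_of_nonneg hc0]
    rw [hlenI] at e2 e3
    have hlenN : (PySem.List.pyRange 0 c 1).length = c.toNat := by
      rw [PySem.List.length_pyRange_one]; simp
    rw [hlenN] at e1
    have hstate : pvLoopB (d, pos) idx c =
        ((pvLoopB (d, pos) idx c).1, pos + c) := by
      have : (pvLoopB (d, pos) idx c).2 = pos + c := e2
      rw [← this]
    rw [hstate]
    have e3' : pvInv (pvLoopB (d, pos) idx c).1 (pos + c) := e3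
    have e1' : (pvLoopB (d, pos) idx c).1.items = d.items ++ pvEntsFor pos idx c.toNat := e1
    obtain ⟨ihr1, ihr2, ihr3⟩ := ih (idx + 1) ((pvLoopB (d, pos) idx c).1) (pos + c) e3'
      (fun x hx => hc x (by simp [hx]))
    refine ⟨?_, ?_, ?_⟩
    · rw [ihr1, e1', pvEnts]
      simp
    · rw [ihr2]; simp [List.sum_cons]; ring
    · have hb : pos + (c :: cs).sum = (pos + c) + cs.sum := by
        simp [List.sum_cons]; ring
      rw [hb]; exact ihr3

-- counts produced by pass 1 are nonneg
theorem counts_nonneg (mul : Int) (demand : List Int) :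
    ∀ c ∈ demand.map (fun i => ((pvChunkB mul i).length : Int)), 0 ≤ c := by
  intro c hc
  simp only [List.mem_map] at hc
  obtain ⟨i, _, rfl⟩ := hc
  positivity

-- ===== VERDICT (by name: the statement is the Claim_ definition above) =====
theorem create_demand_arr_dict_spec : Claim_equal_create_demand_arr_dict := by
  unfold Claim_equal_create_demand_arr_dict
  intro mul demand _ _
  unfold Spec_create_demand_arr_dict
  unfold create_demand_arr_dict create_demand_arr_dict_alt
  obtain ⟨a1, a2⟩ := A_outer mul demand 0 [] PySem.Dict.empty (pvInv_empty 0)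
  rw [B_pass1 mul demand [] []]
  simp only [List.nil_append]
  obtain ⟨b1, b2, _⟩ := B_pass2 (demand.map (fun i => ((pvChunkB mul i).length : Int))) 0
    PySem.Dict.empty 0 (pvInv_empty 0) (counts_nonneg mul demand)
  simp only [List.length_nil, Nat.cast_zero] at a1 a2
  rw [Prod.ext_iff]
  constructor
  · simpa using a1
  · rw [b1]
    simpa using a2
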